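-- pv_equiv track=rewrite | github.com/pediapress/mwlib.rl | mwlib/rl/rlhelpers.py | fakeHyphenate
-- ===== SOURCE A (Python) =====
-- def fakeHyphenate(font_list):
--     breakChars = ['/', '.', '+', '-', '_', '?']
--     zws = '<font fontSize="1"> </font>'
--     res = []
--     for txt, font in font_list:
--         for breakChar in breakChars:
--             txt = txt.replace(breakChar, breakChar + zws)
--         res.append((txt, font))
--     return res
-- ===== SOURCE B (Python) =====
-- def fakeHyphenate(font_list):
--     breakChars = {'/', '.', '+', '-', '_', '?'}
--     zws = '<font fontSize="1"> </font>'
--     res = []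
--     for txt, font in font_list:
--         parts = []
--         for ch in txt:
--             parts.append(ch)
--             if ch in breakChars:
--                 parts.append(zws)
--         res.append((''.join(parts), font))
--     return res
-- ===== Notes on version B (the rewrite author's own statement) =====
-- stated objective: idiomatic
-- what changed: Replaces six sequential str.replace scans per string with a single character-by-character pass that appends the zero-width-space marker after each break character, scanning only the original characters.
import Mathlib
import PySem

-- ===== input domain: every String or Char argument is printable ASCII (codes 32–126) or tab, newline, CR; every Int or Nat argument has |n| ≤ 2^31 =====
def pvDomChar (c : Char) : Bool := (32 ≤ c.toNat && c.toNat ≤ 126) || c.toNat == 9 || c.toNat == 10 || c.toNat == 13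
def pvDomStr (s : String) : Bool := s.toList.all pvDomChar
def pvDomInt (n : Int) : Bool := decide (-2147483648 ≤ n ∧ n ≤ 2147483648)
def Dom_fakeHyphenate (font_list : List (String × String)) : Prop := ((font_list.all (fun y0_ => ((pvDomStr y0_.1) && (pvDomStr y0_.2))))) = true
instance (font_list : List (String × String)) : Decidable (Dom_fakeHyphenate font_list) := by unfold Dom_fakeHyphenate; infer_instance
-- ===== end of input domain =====

-- B replaces A's six sequential str.replace scans per string with one character pass
-- that appends the marker after each break character (idiomatic single-pass rewrite).

-- ===== PORT A =====
def pvZws : String := "<font fontSize=\"1\"> </font>"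

def pvBreakStrs : List String := ["/", ".", "+", "-", "_", "?"]

-- A: for each (txt, font): txt = txt.replace(breakChar, breakChar + zws) for the six break chars
def fakeHyphenate (font_list : List (String × String)) : List (String × String) :=
  font_list.foldl
    (fun res tf =>
      res ++ [(pvBreakStrs.foldl (fun txt bc => PySem.Str.replace txt bc (bc ++ pvZws)) tf.1, tf.2)])
    []

-- ===== PORT B =====
def pvBreakSet : PySem.Set Char := PySem.Set.ofList ['/', '.', '+', '-', '_', '?']

-- B: one pass over txt's characters, appending zws after each break character
def fakeHyphenate_alt (font_list : List (String × String)) : List (String × String) :=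
  font_list.foldl
    (fun res tf =>
      res ++ [(String.ofList (tf.1.toList.flatMap
                 (fun c => if pvBreakSet.contains c then c :: pvZws.toList else [c])), tf.2)])
    []

-- ===== PRECONDITION & SPEC =====
def Spec_fakeHyphenate (font_list : List (String × String)) (out : List (String × String)) : Prop := out = fakeHyphenate_alt font_list
instance (font_list : List (String × String)) (out : List (String × String)) : Decidable (Spec_fakeHyphenate font_list out) := by unfold Spec_fakeHyphenate; infer_instance

-- ===== CLAIM (what is proved, stated in full; the proofs are below) =====
def Claim_equal_fakeHyphenate : Prop := ∀ (font_list : List (String × String)), Dom_fakeHyphenate font_list → Spec_fakeHyphenate font_list (fakeHyphenate font_list)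

-- ===== LEMMAS AND PROOFS =====

-- expansion of a char list with respect to a set S of break chars already processed
def pvExp (S : List Char) (l : List Char) : List Char :=
  l.flatMap (fun c => if c ∈ S then c :: pvZws.toList else [c])

-- replace with a single-char pattern is a flatMap over the characters
theorem pv_go_single (p : Char) (new : List Char) :
    ∀ (l acc : List Char), PySem.Chars.replace.go [p] new l.length l acc =
      acc.reverse ++ l.flatMap (fun c => if c = p then new else [c]) := by
  intro l
  induction l with
  | nil =>
    intro acc
    simp only [List.length_nil]
    rw [PySem.Chars.replace.go]
    simp
  | cons c t ih =>
    intro acc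
    simp only [List.length_cons]
    rw [PySem.Chars.replace.go]
    by_cases h : c = p
    · subst h
      simp only [List.isPrefixOf, beq_self_eq_true, Bool.true_and,
        if_true, List.length_cons, List.length_nil, List.drop_succ_cons, List.drop_zero]
      rw [ih]
      simp
    · have hpre : [p].isPrefixOf (c :: t) = false := by
        simp only [List.isPrefixOf, Bool.and_true]
        simpa using fun hcp => absurd hcp.symm h
      rw [hpre]
      simp only [Bool.false_eq_true, if_false]
      rw [ih]
      simp [h]

theorem pv_replace_single (p : Char) (new l : List Char) :
    PySem.Chars.replace l [p] new = l.flatMap (fun c => if c = p then new else [c]) := by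
  rw [PySem.Chars.replace]
  simp only [List.isEmpty, Bool.false_eq_true, if_false]
  simpa using pv_go_single p new l []

-- one more single-char replace on an already-expanded string, when p is fresh and not in zws
theorem pv_step (p : Char) (S : List Char) (hp : p ∉ pvZws.toList) (hS : p ∉ S)
    (l : List Char) :
    (pvExp S l).flatMap (fun c => if c = p then p :: pvZws.toList else [c]) =
      pvExp (p :: S) l := by
  unfold pvExp
  rw [List.flatMap_assoc]
  apply List.flatMap_congr
  intro c _
  have hz : pvZws.toList.flatMap (fun c => if c = p then p :: pvZws.toList else [c])
      = pvZws.toList := by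
    rw [show (pvZws.toList.flatMap (fun c => if c = p then p :: pvZws.toList else [c])
          = pvZws.toList) ↔ _ from Iff.rfl]
    calc pvZws.toList.flatMap (fun c => if c = p then p :: pvZws.toList else [c])
        = pvZws.toList.flatMap (fun c => [c]) := by
          apply List.flatMap_congr
          intro x hx
          have : x ≠ p := fun h => hp (h ▸ hx)
          simp [this]
      _ = pvZws.toList := by simp
  by_cases hc : c ∈ S
  · have hcp : c ≠ p := fun h => hS (h ▸ hc)
    simp [hc, hcp, hz, List.mem_cons]
  · by_cases hcp : c = p
    · subst hcp
      simp [hc, List.mem_cons]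
    · simp [hc, hcp, List.mem_cons]

-- the six sequential replaces equal one single-pass expansion, at the char level
theorem pv_chain (l : List Char) :
    (pvBreakStrs.foldl (fun t bc => PySem.Str.replace t bc (bc ++ pvZws)) (String.ofList l)).toList
      = l.flatMap (fun c => if pvBreakSet.contains c then c :: pvZws.toList else [c]) := by
  have e : ∀ (p : Char) (m : List Char),
      PySem.Chars.replace m [p] (p :: pvZws.toList)
        = m.flatMap (fun c => if c = p then p :: pvZws.toList else [c]) :=
    fun p m => pv_replace_single p _ m
  have h1 : pvExp [] l = l := by simp [pvExp]
  have hstep : ∀ (p : Char) (S : List Char), p ∉ pvZws.toList → p ∉ S →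
      PySem.Chars.replace (pvExp S l) [p] (p :: pvZws.toList) = pvExp (p :: S) l := by
    intro p S hp hS
    rw [e p]; exact pv_step p S hp hS l
  have h0 : PySem.Chars.replace l ['/'] ('/' :: pvZws.toList) = pvExp ['/'] l := by
    rw [e]; unfold pvExp
    apply List.flatMap_congr
    intro c _
    by_cases hc : c = '/' <;> simp [hc]
  have key : PySem.Chars.replace (PySem.Chars.replace (PySem.Chars.replace
      (PySem.Chars.replace (PySem.Chars.replace (PySem.Chars.replace l
        ['/'] ('/' :: pvZws.toList)) ['.'] ('.' :: pvZws.toList)) ['+'] ('+' :: pvZws.toList))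
        ['-'] ('-' :: pvZws.toList)) ['_'] ('_' :: pvZws.toList)) ['?'] ('?' :: pvZws.toList)
      = pvExp ['?', '_', '-', '+', '.', '/'] l := by
    rw [h0, hstep '.' ['/'] (by decide) (by decide),
        hstep '+' ['.', '/'] (by decide) (by decide),
        hstep '-' ['+', '.', '/'] (by decide) (by decide),
        hstep '_' ['-', '+', '.', '/'] (by decide) (by decide),
        hstep '?' ['_', '-', '+', '.', '/'] (by decide) (by decide)]
  show (PySem.Str.replace (PySem.Str.replace (PySem.Str.replace (PySem.Str.replace
      (PySem.Str.replace (PySem.Str.replace (String.ofList l) "/" ("/" ++ pvZws))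
        "." ("." ++ pvZws)) "+" ("+" ++ pvZws)) "-" ("-" ++ pvZws)) "_" ("_" ++ pvZws))
      "?" ("?" ++ pvZws)).toList = _
  simp only [PySem.Str.toList_replace, String.toList_append]
  rw [show ("/" : String).toList = ['/'] from rfl, show ("." : String).toList = ['.'] from rfl,
      show ("+" : String).toList = ['+'] from rfl, show ("-" : String).toList = ['-'] from rfl,
      show ("_" : String).toList = ['_'] from rfl, show ("?" : String).toList = ['?'] from rfl,
      show (String.ofList l).toList = l from by simp]
  simp only [List.singleton_append]
  rw [key]
  unfold pvExp
  apply List.flatMap_congr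
  intro c _
  have : (c ∈ ['?', '_', '-', '+', '.', '/']) ↔ pvBreakSet.contains c = true := by
    have h2 : pvBreakSet.contains c = true ↔ c ∈ PySem.Set.ofList ['/', '.', '+', '-', '_', '?'] :=
      PySem.Set.contains_iff _ _
    rw [h2, PySem.Set.mem_ofList]
    simp only [List.mem_cons, List.not_mem_nil, or_false]
    constructor <;> intro h <;> rcases h with h | h | h | h | h | h <;> subst h <;> decide
  by_cases hc : pvBreakSet.contains c = true
  · rw [if_pos (this.mpr hc), if_pos hc]
  · rw [if_neg (fun h => hc (this.mp h)), if_neg hc]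

-- each pair: the six replaces equal the single pass, at the string level
theorem pv_pair (txt : String) :
    pvBreakStrs.foldl (fun t bc => PySem.Str.replace t bc (bc ++ pvZws)) txt
      = String.ofList (txt.toList.flatMap
          (fun c => if pvBreakSet.contains c then c :: pvZws.toList else [c])) := by
  have h := pv_chain txt.toList
  rw [show String.ofList txt.toList = txt from by simp] at h
  calc pvBreakStrs.foldl (fun t bc => PySem.Str.replace t bc (bc ++ pvZws)) txt
      = String.ofList (pvBreakStrs.foldl
          (fun t bc => PySem.Str.replace t bc (bc ++ pvZws)) txt).toList := by simp
    _ = _ := by rw [h]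

theorem pv_fold (l : List (String × String)) :
    ∀ acc : List (String × String),
      l.foldl (fun res tf =>
          res ++ [(pvBreakStrs.foldl (fun t bc => PySem.Str.replace t bc (bc ++ pvZws)) tf.1, tf.2)]) acc
        = l.foldl (fun res tf =>
            res ++ [(String.ofList (tf.1.toList.flatMap
                (fun c => if pvBreakSet.contains c then c :: pvZws.toList else [c])), tf.2)]) acc := by
  induction l with
  | nil => intro acc; rw [List.foldl_nil, List.foldl_nil]
  | cons hd tl ih =>
    intro acc
    simp only [List.foldl_cons]
    rw [pv_pair]
    exact ih _

-- ===== VERDICT (by name: the statement is the Claim_ definition above) =====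
theorem fakeHyphenate_spec : Claim_equal_fakeHyphenate := by
  intro font_list _
  unfold Spec_fakeHyphenate fakeHyphenate fakeHyphenate_alt
  exact pv_fold font_list []
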